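-- pv_equiv track=rewrite | github.com/TUT-SLP-lab/MultimodalReactionGeneration | mr_gen/utils/data_analysis/data_extractor.py | remove_duplication
-- ===== SOURCE A (Python) =====
-- from typing import List
--
-- def remove_duplication(target: List[str]) -> List[str]:
--     _target = [target[0]]
--     for t in target[1:]:
--         # the same name directory is stored side by side.
--         if _target[-1] != t:
--             _target.append(t)
--         else:
--             continue
--     return _target
-- ===== SOURCE B (Python) =====
-- from typing import List
--
-- def remove_duplication(target: List[str]) -> List[str]:
--     # divide and conquer: collapse consecutive duplicates in each half
--     # independently, then join the halves, dropping the right half's head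
--     # when it equals the left half's last element.
--     if len(target) <= 1:
--         return list(target)
--     mid = len(target) // 2
--     left = remove_duplication(target[:mid])
--     right = remove_duplication(target[mid:])
--     if left[-1] == right[0]:
--         return left + right[1:]
--     return left + right
-- ===== Notes on version B (the rewrite author's own statement) =====
-- stated objective: alternative
-- what changed: B replaces A's single left-to-right pass with an accumulator-last check by a divide-and-conquer scheme: recursively collapse each half of the list, then merge the two collapsed halves, dropping the right half's head when it equals the left half's last element.
import Mathlib
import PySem

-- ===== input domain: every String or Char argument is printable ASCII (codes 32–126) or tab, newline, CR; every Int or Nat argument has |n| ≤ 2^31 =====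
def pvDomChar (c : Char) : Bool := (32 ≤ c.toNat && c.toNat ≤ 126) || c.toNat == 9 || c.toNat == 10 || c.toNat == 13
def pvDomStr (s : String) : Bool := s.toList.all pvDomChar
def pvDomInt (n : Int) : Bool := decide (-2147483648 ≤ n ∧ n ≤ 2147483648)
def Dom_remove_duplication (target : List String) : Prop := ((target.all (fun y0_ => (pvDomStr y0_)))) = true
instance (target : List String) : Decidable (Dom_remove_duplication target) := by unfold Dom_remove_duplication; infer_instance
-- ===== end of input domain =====

-- B replaces A's one-pass accumulator loop by divide and conquer: collapse each half
-- recursively, then join, dropping the right half's head when it equals the left's last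
-- (objective: alternative; same results, different algorithm).


-- ===== PORT A =====
-- one loop step: if _target[-1] != t then append t else continue
def removeDupStepA (acc : List String) (t : String) : List String :=
  if PySem.List.pyGet? acc (-1) ≠ some t then acc ++ [t] else acc

def remove_duplication (target : List String) : List String :=
  match target with
  | [] => []                       -- target[0] raises IndexError in Python; excluded by Pre_
  | h :: tl => List.foldl removeDupStepA [h] tl   -- _target = [target[0]]; for t in target[1:]: …

-- ===== PORT B =====
-- target[:mid] / target[mid:] / right[1:] with 0 ≤ mid ≤ len are exactly take/drop
-- (PySem.List.slice_to_natCast / slice_from_natCast / slice_from_one).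
def remove_duplication_alt (target : List String) : List String :=
  if target.length ≤ 1 then target           -- list(target) returns a copy: same value
  else
    let mid := target.length / 2
    let left := remove_duplication_alt (target.take mid)
    let right := remove_duplication_alt (target.drop mid)
    if PySem.List.pyGet? left (-1) = PySem.List.pyGet? right 0 then   -- left[-1] == right[0]
      left ++ right.drop 1
    else
      left ++ right
termination_by target.length
decreasing_by
  · simp only [List.length_take]; omega
  · simp only [List.length_drop]; omega

-- ===== PRECONDITION & SPEC =====
-- Pre_ excludes only the empty list, on which Python A raises IndexError.
def Pre_remove_duplication (target : List String) : Prop := target ≠ []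
instance (target : List String) : Decidable (Pre_remove_duplication target) := by
  unfold Pre_remove_duplication; infer_instance

def pvWitness_remove_duplication : List String := ["a", "a", "b"]

def Spec_remove_duplication (target : List String) (out : List String) : Prop := out = remove_duplication_alt target
instance (target : List String) (out : List String) : Decidable (Spec_remove_duplication target out) := by unfold Spec_remove_duplication; infer_instance

-- ===== CLAIM (what is proved, stated in full; the proofs are below) =====
def Claim_equal_remove_duplication : Prop := ∀ (target : List String), Dom_remove_duplication target → Pre_remove_duplication target → Spec_remove_duplication target (remove_duplication target)

-- ===== LEMMAS AND PROOFS =====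
-- Reference function: collapse consecutive duplicates, structurally.
def ddRuns : List String → List String
  | [] => []
  | [x] => [x]
  | x :: y :: tl => if x = y then ddRuns (y :: tl) else x :: ddRuns (y :: tl)

theorem dd_cons_ex : ∀ (l : List String) (x : String), ∃ t, ddRuns (x :: l) = x :: t := by
  intro l
  induction l with
  | nil => intro x; exact ⟨[], rfl⟩
  | cons y tl ih =>
      intro x
      by_cases h : x = y
      · obtain ⟨t, ht⟩ := ih y
        exact ⟨t, by simp [ddRuns, h, ht]⟩
      · exact ⟨ddRuns (y :: tl), by simp [ddRuns, h]⟩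

theorem dd_head? (l : List String) : (ddRuns l).head? = l.head? := by
  cases l with
  | nil => rfl
  | cons x tl => obtain ⟨t, ht⟩ := dd_cons_ex tl x; simp [ht]

theorem dd_getLast? : ∀ (l : List String), (ddRuns l).getLast? = l.getLast? := by
  intro l
  induction l with
  | nil => rfl
  | cons x tl ih =>
      cases tl with
      | nil => rfl
      | cons y tl' =>
          by_cases h : x = y
          · simpa [ddRuns, h] using ih
          · obtain ⟨t, ht⟩ := dd_cons_ex tl' y
            simp only [ddRuns, h, if_false]
            rw [List.getLast?_cons, List.getLast?_cons]
            rw [ht] at ih ⊢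
            simp_all

-- A's fold computes ddRuns, prefixed by the untouched accumulator.
theorem foldA_eq_dd (ts : List String) :
    ∀ (acc : List String) (p : String),
      List.foldl removeDupStepA (acc ++ [p]) ts = acc ++ ddRuns (p :: ts) := by
  induction ts with
  | nil => intro acc p; simp [ddRuns]
  | cons t ts ih =>
      intro acc p
      by_cases h : p = t
      · subst h
        simp only [List.foldl_cons, removeDupStepA,
          PySem.List.pyGet?_neg_one_append_singleton, ne_eq, not_true_eq_false,
          if_false, ddRuns, if_true]
        exact ih acc p
      · simp only [List.foldl_cons, removeDupStepA,
          PySem.List.pyGet?_neg_one_append_singleton, ne_eq, Option.some.injEq, h,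
          not_false_eq_true, if_true]
        rw [ih (acc ++ [p]) t]
        simp [ddRuns, h]

-- Merging two collapsed halves: drop the right head exactly when it equals the left's last.
theorem dd_append : ∀ (l1 l2 : List String), l1 ≠ [] →
    ddRuns (l1 ++ l2)
      = ddRuns l1 ++ (if l1.getLast? = l2.head? then (ddRuns l2).drop 1 else ddRuns l2) := by
  intro l1
  induction l1 with
  | nil => intro l2 h; exact absurd rfl h
  | cons x l1 ih =>
      intro l2 _
      cases l1 with
      | nil =>
          cases l2 with
          | nil => simp [ddRuns]
          | cons y tl =>
              by_cases h : x = y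
              · obtain ⟨t, ht⟩ := dd_cons_ex tl y
                simp [ddRuns, h, ht]
              · simp [ddRuns, h]
      | cons y l1' =>
          have hne : (y :: l1') ≠ [] := by simp
          have hrec := ih l2 hne
          rw [List.cons_append] at hrec
          show ddRuns (x :: y :: (l1' ++ l2))
              = ddRuns (x :: y :: l1')
                ++ (if (x :: y :: l1').getLast? = l2.head? then (ddRuns l2).drop 1 else ddRuns l2)
          by_cases h : x = y
          · subst h
            rw [show ddRuns (x :: x :: (l1' ++ l2)) = ddRuns (x :: (l1' ++ l2)) from by simp [ddRuns],
              show ddRuns (x :: x :: l1') = ddRuns (x :: l1') from by simp [ddRuns],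
              List.getLast?_cons_cons]
            exact hrec
          · rw [show ddRuns (x :: y :: (l1' ++ l2)) = x :: ddRuns (y :: (l1' ++ l2)) from by simp [ddRuns, h],
              show ddRuns (x :: y :: l1') = x :: ddRuns (y :: l1') from by simp [ddRuns, h],
              List.getLast?_cons_cons, hrec]
            simp

-- B computes ddRuns (strong induction on the length, matching the halving recursion).
theorem alt_eq_dd : ∀ (n : Nat) (l : List String), l.length ≤ n →
    remove_duplication_alt l = ddRuns l := by
  intro n
  induction n with
  | zero =>
      intro l hl
      have : l = [] := List.eq_nil_of_length_eq_zero (Nat.le_zero.mp hl)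
      subst this; rw [remove_duplication_alt]; rfl
  | succ n ih =>
      intro l hl
      by_cases hsmall : l.length ≤ 1
      · rw [remove_duplication_alt]
        simp only [hsmall, if_true]
        match l, hsmall with
        | [], _ => rfl
        | [x], _ => rfl
      · rw [remove_duplication_alt]
        simp only [hsmall, if_false]
        have hlen : 2 ≤ l.length := by omega
        have hmid1 : 1 ≤ l.length / 2 := by omega
        have hmid2 : l.length / 2 < l.length := by omega
        have hleft : remove_duplication_alt (l.take (l.length / 2)) = ddRuns (l.take (l.length / 2)) := by
          apply ih; simp only [List.length_take]; omega
        have hright : remove_duplication_alt (l.drop (l.length / 2)) = ddRuns (l.drop (l.length / 2)) := by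
          apply ih; simp only [List.length_drop]; omega
        rw [hleft, hright]
        have htake_ne : l.take (l.length / 2) ≠ [] := by
          intro h
          have := congrArg List.length h
          simp only [List.length_take, List.length_nil] at this
          omega
        have happ := dd_append (l.take (l.length / 2)) (l.drop (l.length / 2)) htake_ne
        rw [List.take_append_drop] at happ
        rw [happ]
        rw [PySem.List.pyGet?_neg_one, PySem.List.pyGet?_zero, ← List.head?_eq_getElem?]
        rw [dd_getLast?, dd_head?]
        split <;> rfl

-- ===== VERDICT (by name: the statements are the Claim_ definitions above) =====
theorem remove_duplication_spec : Claim_equal_remove_duplication := by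
  intro target _ hpre
  unfold Spec_remove_duplication
  match target with
  | [] => exact absurd rfl hpre
  | h :: tl =>
      show List.foldl removeDupStepA [h] tl = _
      rw [alt_eq_dd (h :: tl).length (h :: tl) le_rfl]
      simpa using foldA_eq_dd tl [] h
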